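-- pv_equiv track=rewrite | github.com/MrBrantCode/unitest_baseline | mut_generate/mist_train_taco/taco_2643/solution.py | simplify_directions
-- ===== SOURCE A (Python) =====
-- def simplify_directions(directions: str) -> str:
--     new_p = [(0, 0)]
--     new_str = ''
--     x = 0
--     y = 0
--
--     for direction in directions:
--         if direction == '<':
--             x -= 1
--         elif direction == '>':
--             x += 1
--         elif direction == '^':
--             y += 1
--         elif direction == 'v':
--             y -= 1
--
--         if (x, y) not in new_p:
--             new_p.append((x, y))
--             new_str += direction
--         else:
--             for j in new_p[::-1]:
--                 if j != (x, y):
--                     new_p.pop()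
--                     new_str = new_str[:-1]
--                 else:
--                     break
--
--     return new_str
-- ===== SOURCE B (Python) =====
-- def simplify_directions(directions: str) -> str:
--     DELTA = {'<': (-1, 0), '>': (1, 0), '^': (0, 1), 'v': (0, -1)}
--     # pass 1: the full walk of positions (one per prefix of the input)
--     walk = [(0, 0)]
--     for d in directions:
--         dx, dy = DELTA.get(d, (0, 0))
--         x, y = walk[-1]
--         walk.append((x + dx, y + dy))
--     # pass 2: last time each position is occupied
--     last = {p: i for i, p in enumerate(walk)}
--     # pass 3: loop-erased walk by jumping to the last occurrence of each
--     # visited position: the step leaving position walk[i] for good is kept.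
--     out = []
--     i = last[(0, 0)]
--     n = len(walk) - 1
--     while i < n:
--         out.append(directions[i])
--         i = last[walk[i + 1]]
--     return ''.join(out)
-- ===== Notes on version B (the rewrite author's own statement) =====
-- stated objective: alternative
-- what changed: Instead of A's single pass that maintains the simplified path as a stack, scans it for each new position and pops it back element by element on a revisit, B makes three passes with no stack and no truncation: it materialises the full walk of positions, builds a last-occurrence index of every position, and reconstructs the answer by jumping forward from each kept position directly to the last time the walk occupies it (loop erasure = last-exit decomposition).
import Mathlib
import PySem

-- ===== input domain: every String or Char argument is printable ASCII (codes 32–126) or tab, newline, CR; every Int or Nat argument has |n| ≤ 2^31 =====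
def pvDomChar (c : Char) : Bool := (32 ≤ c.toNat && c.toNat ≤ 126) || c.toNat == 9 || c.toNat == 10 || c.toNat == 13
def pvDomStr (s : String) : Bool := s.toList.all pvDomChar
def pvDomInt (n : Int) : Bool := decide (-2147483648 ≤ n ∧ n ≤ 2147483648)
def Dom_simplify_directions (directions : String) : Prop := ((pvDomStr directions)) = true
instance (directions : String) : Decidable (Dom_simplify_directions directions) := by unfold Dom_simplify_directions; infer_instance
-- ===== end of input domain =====

-- B replaces A's stack-with-truncation single pass by three passes: materialise the full
-- walk, index each position's last occurrence, then jump forward along last occurrences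
-- (loop erasure = last-exit decomposition); this file proves the return values equal.

-- ===== PORT A =====
-- A's if/elif chain updating x, y
def pvMoveA (x y : Int) (c : Char) : Int × Int :=
  if c = '<' then (x - 1, y)
  else if c = '>' then (x + 1, y)
  else if c = '^' then (x, y + 1)
  else if c = 'v' then (x, y - 1)
  else (x, y)

-- A's inner 'for j in new_p[::-1]: if j != (x, y): new_p.pop(); trim new_str else: break'
-- (the iteration is over the snapshot new_p[::-1], so rev stays fixed while p, s shrink)
def pvPopA (rev : List (Int × Int)) (t : Int × Int) (p : List (Int × Int)) (s : List Char) :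
    List (Int × Int) × List Char :=
  match rev with
  | [] => (p, s)
  | j :: rest => if j ≠ t then pvPopA rest t p.dropLast s.dropLast else (p, s)

-- one iteration of A's main loop; state = (new_p, new_str as chars, x, y)
def pvStepA (st : List (Int × Int) × List Char × Int × Int) (c : Char) :
    List (Int × Int) × List Char × Int × Int :=
  let xy := pvMoveA st.2.2.1 st.2.2.2 c
  if xy ∉ st.1 then (st.1 ++ [xy], st.2.1 ++ [c], xy.1, xy.2)
  else
    let r := pvPopA st.1.reverse xy st.1 st.2.1
    (r.1, r.2, xy.1, xy.2)

def simplify_directions (directions : String) : String :=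
  String.mk ((directions.toList.foldl pvStepA ([(0, 0)], [], 0, 0)).2.1)

-- ===== PORT B =====
-- B's DELTA literal
def pvDeltaB : PySem.Dict Char (Int × Int) :=
  PySem.Dict.mk [('<', (-1, 0)), ('>', (1, 0)), ('^', (0, 1)), ('v', (0, -1))]

-- pass 1: the full walk of positions (walk[-1] of the always-nonempty list via getLastD)
def pvWalkB (cs : List Char) : List (Int × Int) :=
  cs.foldl (fun w d =>
    let dxy := pvDeltaB.getD d (0, 0)
    let xy := w.getLastD (0, 0)
    w ++ [(xy.1 + dxy.1, xy.2 + dxy.2)]) [(0, 0)]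

-- pass 2: {p: i for i, p in enumerate(walk)}
def pvLastB (walk : List (Int × Int)) : PySem.Dict (Int × Int) Int :=
  (PySem.List.enumerate walk).foldl (fun d ip => d.insert ip.2 ip.1) PySem.Dict.empty

-- pass 3: 'while i < n: out.append(directions[i]); i = last[walk[i + 1]]'.
-- fuel only makes the while loop total: i strictly increases and stays below n,
-- so walk.length iterations always suffice; the 'none' fallbacks are unreachable
-- (0 ≤ i < n = len(directions), and every walk position is a key of last).
def pvJumpB (cs : List Char) (walk : List (Int × Int))
    (last : PySem.Dict (Int × Int) Int) (n : Int) :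
    Nat → Int → List Char → List Char
  | 0, _, out => out
  | fuel + 1, i, out =>
    if i < n then
      match PySem.List.pyGet? cs i, PySem.List.pyGet? walk (i + 1) with
      | some c, some p =>
        match last.get? p with
        | some j => pvJumpB cs walk last n fuel j (out ++ [c])
        | none => out ++ [c]
      | _, _ => out
    else out

def simplify_directions_alt (directions : String) : String :=
  let cs := directions.toList
  let walk := pvWalkB cs
  let last := pvLastB walk
  let n : Int := (walk.length : Int) - 1
  String.mk (pvJumpB cs walk last n walk.length (last.getD (0, 0) 0) [])

-- ===== PRECONDITION & SPEC =====
def Spec_simplify_directions (directions : String) (out : String) : Prop := out = simplify_directions_alt directions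
instance (directions : String) (out : String) : Decidable (Spec_simplify_directions directions out) := by unfold Spec_simplify_directions; infer_instance

-- ===== CLAIM (what is proved, stated in full; the proofs are below) =====
def Claim_equal_simplify_directions : Prop := ∀ (directions : String), Dom_simplify_directions directions → Spec_simplify_directions directions (simplify_directions directions)

-- ===== LEMMAS AND PROOFS =====

-- the moved position computed from B's DELTA dict equals A's if/elif chain
lemma move_eq (x y : Int) (c : Char) :
    (x + (pvDeltaB.getD c (0, 0)).1, y + (pvDeltaB.getD c (0, 0)).2) = pvMoveA x y c := by
  by_cases h1 : c = '<'
  · subst h1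
    rw [show pvDeltaB.getD '<' (0, 0) = (-1, 0) by decide,
      show pvMoveA x y '<' = (x - 1, y) from rfl]
    simp [Prod.ext_iff]; omega
  by_cases h2 : c = '>'
  · subst h2
    rw [show pvDeltaB.getD '>' (0, 0) = (1, 0) by decide,
      show pvMoveA x y '>' = (x + 1, y) by simp [pvMoveA]]
    simp
  by_cases h3 : c = '^'
  · subst h3
    rw [show pvDeltaB.getD '^' (0, 0) = (0, 1) by decide,
      show pvMoveA x y '^' = (x, y + 1) by simp [pvMoveA]]
    simp
  by_cases h4 : c = 'v'
  · subst h4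
    rw [show pvDeltaB.getD 'v' (0, 0) = (0, -1) by decide,
      show pvMoveA x y 'v' = (x, y - 1) by simp [pvMoveA]]
    simp [Prod.ext_iff]; omega
  have hd : pvDeltaB.getD c (0, 0) = (0, 0) := by
    simp [pvDeltaB, PySem.Dict.getD, PySem.Dict.get?,
      Ne.symm h1, Ne.symm h2, Ne.symm h3, Ne.symm h4]
  rw [hd]
  simp [pvMoveA, h1, h2, h3, h4]

-- A's pop-back loop truncates new_p to its prefix ending at the revisited position
lemma popA_spec (q : Int × Int) (p : List (Int × Int)) :
    ∀ (s : List Char) (k : Nat), p.Nodup → p[k]? = some q → s.length + 1 = p.length →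
      pvPopA p.reverse q p s = (p.take (k + 1), s.take k) := by
  induction p using List.reverseRecOn with
  | nil => intro s k _ hk _; simp at hk
  | append_singleton p' a ih =>
    intro s k hnd hk hlen
    have hnd' := List.nodup_append.mp hnd
    have hlen' : s.length = p'.length := by
      simp at hlen; omega
    rw [List.reverse_append, List.reverse_singleton, List.singleton_append]
    by_cases hq : a = q
    · subst hq
      have hnotin : a ∉ p' := by
        intro hmem
        rcases hnd' with ⟨-, -, hd⟩
        exact hd a hmem a (by simp) rfl
      have hkeq : k = p'.length := by
        rcases lt_trichotomy k p'.length with hlt | heq | hgt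
        · exfalso
          rw [List.getElem?_append_left hlt] at hk
          exact hnotin (List.mem_of_getElem? hk)
        · exact heq
        · exfalso
          rw [List.getElem?_eq_none (by simp; omega)] at hk
          simp at hk
      subst hkeq
      rw [pvPopA]
      simp only [ne_eq, not_true_eq_false, ite_false]
      rw [List.take_of_length_le (by simp), List.take_of_length_le (by omega)]
    · have hk' : k < p'.length := by
        rcases lt_trichotomy k p'.length with hlt | heq | hgt
        · exact hlt
        · exfalso
          subst heq
          rw [List.getElem?_append_right (le_refl _)] at hk
          simp at hk
          exact hq hk
        · exfalso
          rw [List.getElem?_eq_none (by simp; omega)] at hk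
          simp at hk
      have hkp : p'[k]? = some q := by
        rw [List.getElem?_append_left hk'] at hk; exact hk
      rw [pvPopA]
      simp only [hq, ne_eq, not_false_eq_true, ite_true]
      rw [List.dropLast_concat]
      rw [ih s.dropLast k hnd'.1 hkp (by simp [List.length_dropLast]; omega)]
      have h1 : p'.take (k + 1) = (p' ++ [a]).take (k + 1) := by
        rw [List.take_append_of_le_length (by omega)]
      have h2 : s.dropLast.take k = s.take k := by
        rw [List.dropLast_eq_take, List.take_take]
        congr 1
        omega
      rw [h1, h2]

-- the walk over cs ++ [c] extends the walk over cs by one step from its last position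
lemma walkB_snoc (cs : List Char) (c : Char) :
    pvWalkB (cs ++ [c]) =
      pvWalkB cs ++
        [(((pvWalkB cs).getLastD (0, 0)).1 + (pvDeltaB.getD c (0, 0)).1,
          ((pvWalkB cs).getLastD (0, 0)).2 + (pvDeltaB.getD c (0, 0)).2)] := by
  unfold pvWalkB
  rw [List.foldl_append]
  rfl

lemma walkB_aux (cs : List Char) : ∀ (w : List (Int × Int)),
    (cs.foldl (fun w d =>
      let dxy := pvDeltaB.getD d (0, 0)
      let xy := w.getLastD (0, 0)
      w ++ [(xy.1 + dxy.1, xy.2 + dxy.2)]) w).length = w.length + cs.length := by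
  induction cs with
  | nil => intro w; simp
  | cons c tl ih =>
    intro w
    rw [List.foldl_cons, ih]
    simp
    omega

lemma walkB_length (cs : List Char) : (pvWalkB cs).length = cs.length + 1 := by
  unfold pvWalkB; rw [walkB_aux]; simp; omega

-- the last-occurrence dict over a snoc walk is one overwriting insert
lemma lastB_snoc (w : List (Int × Int)) (v : Int × Int) :
    pvLastB (w ++ [v]) = (pvLastB w).insert v (w.length : Int) := by
  unfold pvLastB
  rw [PySem.List.enumerate_append, List.foldl_append]
  simp [PySem.List.enumerate_cons, PySem.List.enumerate_nil]

-- the dict value really is the LAST occurrence: it dominates every occurrence index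
lemma lastB_ge (w : List (Int × Int)) :
    ∀ (q : Int × Int) (j : Int) (k : Nat),
      (pvLastB w).get? q = some j → w[k]? = some q → (k : Int) ≤ j := by
  induction w using List.reverseRecOn with
  | nil => intro q j k h hk; simp at hk
  | append_singleton w v ih =>
    intro q j k h hk
    rw [lastB_snoc, PySem.Dict.get?_insert] at h
    by_cases hq : q = v
    · subst hq
      rw [if_pos rfl] at h
      have : j = (w.length : Int) := (Option.some.inj h).symm
      subst this
      have hlt : k < w.length + 1 := by
        obtain ⟨h', -⟩ := List.getElem?_eq_some_iff.mp hk
        simpa using h'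
      omega
    · rw [if_neg hq] at h
      by_cases hkw : k < w.length
      · exact ih q j k h (by rwa [List.getElem?_append_left hkw] at hk)
      · exfalso
        have hlt : k < w.length + 1 := by
          obtain ⟨h', -⟩ := List.getElem?_eq_some_iff.mp hk
          simpa using h'
        have hkeq : k = w.length := by omega
        subst hkeq
        rw [List.getElem?_append_right (le_refl _)] at hk
        simp at hk
        exact hq hk.symm

-- the chain of last-occurrence links that ties A's stack/string to B's jump walk:
-- each stack entry q is last occupied at its stored index j, the walk then steps to the
-- next stack entry, and that step's character is the corresponding output character
def pvLinks (cs : List Char) (walk : List (Int × Int)) (ld : PySem.Dict (Int × Int) Int)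
    (n : Nat) : Nat → List (Int × Int) → List Char → Prop
  | j, [q], [] => ld.get? q = some (j : Int) ∧ j = n
  | j, q :: q' :: ps, c :: s =>
      ld.get? q = some (j : Int) ∧ j < n ∧ cs[j]? = some c ∧ walk[j + 1]? = some q' ∧
        ∃ j', pvLinks cs walk ld n j' (q' :: ps) s
  | _, _, _ => False

lemma links_get (cs : List Char) (walk : List (Int × Int)) (ld : PySem.Dict (Int × Int) Int)
    (n j : Nat) (p : List (Int × Int)) (s : List Char) (h : pvLinks cs walk ld n j p s) :
    ∃ q ps, p = q :: ps ∧ ld.get? q = some (j : Int) := by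
  cases p with
  | nil => cases s <;> simp [pvLinks] at h
  | cons q ps =>
    cases ps with
    | nil =>
      cases s with
      | nil => simp only [pvLinks] at h; exact ⟨q, [], rfl, h.1⟩
      | cons c s' => simp [pvLinks] at h
    | cons q' ps' =>
      cases s with
      | nil => simp [pvLinks] at h
      | cons c s' => simp only [pvLinks] at h; exact ⟨q, q' :: ps', rfl, h.1⟩

-- B's jump loop plays out a link chain: it emits exactly the chain's characters
lemma jump_links (cs : List Char) (walk : List (Int × Int))
    (ld : PySem.Dict (Int × Int) Int) (n : Nat)
    (hge : ∀ (q : Int × Int) (j' : Int) (k : Nat),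
      ld.get? q = some j' → walk[k]? = some q → (k : Int) ≤ j') :
    ∀ (p : List (Int × Int)) (s : List Char) (j fuel : Nat) (out : List Char),
      pvLinks cs walk ld n j p s → n + 1 ≤ fuel + j →
      pvJumpB cs walk ld (n : Int) fuel (j : Int) out = out ++ s := by
  intro p
  induction p with
  | nil => intro s j fuel out h _; cases s <;> simp [pvLinks] at h
  | cons q ps ih =>
    intro s j fuel out h hfuel
    cases ps with
    | nil =>
      cases s with
      | cons c s' => simp [pvLinks] at h
      | nil =>
        simp only [pvLinks] at h
        obtain ⟨-, hj⟩ := h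
        subst hj
        cases fuel with
        | zero => omega
        | succ f => rw [pvJumpB, if_neg (by omega)]; simp
    | cons q' ps' =>
      cases s with
      | nil => simp [pvLinks] at h
      | cons c s' =>
        simp only [pvLinks] at h
        obtain ⟨hq, hjn, hcs, hwalk, j', hlinks⟩ := h
        cases fuel with
        | zero => omega
        | succ f =>
          rw [pvJumpB, if_pos (by exact_mod_cast hjn)]
          rw [show PySem.List.pyGet? cs (j : Int) = some c by
            rw [PySem.List.pyGet?_natCast]; exact hcs]
          rw [show PySem.List.pyGet? walk ((j : Int) + 1) = some q' by
            rw [show ((j : Int) + 1) = ((j + 1 : Nat) : Int) by push_cast; ring,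
              PySem.List.pyGet?_natCast]
            exact hwalk]
          dsimp only
          obtain ⟨q'', ps'', heq, hq'⟩ := links_get cs walk ld n j' (q' :: ps') s' hlinks
          obtain ⟨h1, -⟩ := List.cons.inj heq
          subst h1
          rw [hq']
          dsimp only
          have hjj : ((j + 1 : Nat) : Int) ≤ (j' : Int) := hge q' (j' : Int) (j + 1) hq' hwalk
          have hjj' : j + 1 ≤ j' := by exact_mod_cast hjj
          rw [ih s' j' f (out ++ [c]) hlinks (by omega)]
          simp

-- appending a fresh position extends the link chain by one link
lemma links_append (cs : List Char) (walk : List (Int × Int))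
    (ld : PySem.Dict (Int × Int) Int) (n : Nat) (c : Char) (v : Int × Int)
    (hcs : cs.length = n) (hw : walk.length = n + 1) :
    ∀ (p : List (Int × Int)) (s : List Char) (j : Nat),
      pvLinks cs walk ld n j p s → v ∉ p →
      pvLinks (cs ++ [c]) (walk ++ [v]) (ld.insert v (walk.length : Int)) (n + 1) j
        (p ++ [v]) (s ++ [c]) := by
  intro p
  induction p with
  | nil => intro s j h _; cases s <;> simp [pvLinks] at h
  | cons q ps ih =>
    intro s j h hv
    have hqv : q ≠ v := fun he => hv (he ▸ List.mem_cons_self)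
    cases ps with
    | nil =>
      cases s with
      | cons c₀ s' => simp [pvLinks] at h
      | nil =>
        simp only [pvLinks] at h
        obtain ⟨hq, hj⟩ := h
        show pvLinks _ _ _ _ _ (q :: v :: []) (c :: [])
        simp only [pvLinks]
        refine ⟨by rw [PySem.Dict.get?_insert, if_neg hqv]; exact hq, by omega, ?_, ?_, ?_⟩
        · rw [show j = cs.length by omega, List.getElem?_concat_length]
        · rw [show j + 1 = walk.length by omega, List.getElem?_concat_length]
        · refine ⟨n + 1, ?_⟩
          refine ⟨?_, rfl⟩
          rw [PySem.Dict.get?_insert_self, hw]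
    | cons q' ps' =>
      cases s with
      | nil => simp [pvLinks] at h
      | cons c₀ s' =>
        simp only [pvLinks] at h
        obtain ⟨hq, hjn, hcsj, hwj, j', hlinks⟩ := h
        have hvtl : v ∉ q' :: ps' := fun hm => hv (List.mem_cons_of_mem _ hm)
        show pvLinks _ _ _ _ _ (q :: ((q' :: ps') ++ [v])) (c₀ :: (s' ++ [c]))
        have hexp : (q' :: ps') ++ [v] = q' :: (ps' ++ [v]) := by simp
        rw [hexp]
        simp only [pvLinks]
        refine ⟨by rw [PySem.Dict.get?_insert, if_neg hqv]; exact hq, by omega, ?_, ?_, ?_⟩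
        · rw [List.getElem?_append_left (by omega)]; exact hcsj
        · rw [List.getElem?_append_left (by omega)]; exact hwj
        · refine ⟨j', ?_⟩
          have := ih s' j' hlinks hvtl
          rw [hexp] at this
          exact this

-- truncating at a revisited position keeps the chain up to it and re-terminates there
lemma links_truncate (cs : List Char) (walk : List (Int × Int))
    (ld : PySem.Dict (Int × Int) Int) (n : Nat) (c : Char) (v : Int × Int)
    (hcs : cs.length = n) (hw : walk.length = n + 1) :
    ∀ (p : List (Int × Int)) (s : List Char) (j k : Nat),
      pvLinks cs walk ld n j p s → p.Nodup → p[k]? = some v →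
      ∃ j₂, pvLinks (cs ++ [c]) (walk ++ [v]) (ld.insert v (walk.length : Int)) (n + 1) j₂
        (p.take (k + 1)) (s.take k) := by
  intro p
  induction p with
  | nil => intro s j k h _ _; cases s <;> simp [pvLinks] at h
  | cons q ps ih =>
    intro s j k h hnd hk
    cases k with
    | zero =>
      have hqv : q = v := by simpa using hk
      subst hqv
      refine ⟨n + 1, ?_⟩
      show pvLinks _ _ _ _ _ [q] []
      refine ⟨?_, rfl⟩
      rw [PySem.Dict.get?_insert_self, hw]
    | succ k' =>
      have hktl : ps[k']? = some v := by simpa using hk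
      have hvtl : v ∈ ps := List.mem_of_getElem? hktl
      have hqv : q ≠ v := fun he => (List.nodup_cons.mp hnd).1 (he ▸ hvtl)
      cases ps with
      | nil => simp at hktl
      | cons q' ps' =>
        cases s with
        | nil => simp [pvLinks] at h
        | cons c₀ s' =>
          simp only [pvLinks] at h
          obtain ⟨hq, hjn, hcsj, hwj, j', hlinks⟩ := h
          obtain ⟨j₂, hl₂⟩ := ih s' j' k' hlinks (List.nodup_cons.mp hnd).2 hktl
          refine ⟨j, ?_⟩
          rw [List.take_succ_cons, List.take_succ_cons, List.take_succ_cons]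
          rw [List.take_succ_cons] at hl₂
          simp only [pvLinks]
          refine ⟨by rw [PySem.Dict.get?_insert, if_neg hqv]; exact hq, by omega, ?_, ?_, ⟨j₂, hl₂⟩⟩
          · rw [List.getElem?_append_left (by omega)]; exact hcsj
          · rw [List.getElem?_append_left (by omega)]; exact hwj

-- the invariant carried through A's fold, tying its state to B's walk and last dict
def pvInv (cs : List Char) (st : List (Int × Int) × List Char × Int × Int) : Prop :=
  st.1.Nodup ∧ st.2.1.length + 1 = st.1.length ∧
  st.1.head? = some (0, 0) ∧
  st.1.getLast? = some (st.2.2.1, st.2.2.2) ∧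
  (pvWalkB cs).getLast? = some (st.2.2.1, st.2.2.2) ∧
  ∃ j, pvLinks cs (pvWalkB cs) (pvLastB (pvWalkB cs)) cs.length j st.1 st.2.1

lemma invA (cs : List Char) : pvInv cs (cs.foldl pvStepA ([(0, 0)], [], 0, 0)) := by
  induction cs using List.reverseRecOn with
  | nil =>
    refine ⟨by simp, by simp, by simp, by simp, by decide, 0, ?_, rfl⟩
    decide
  | append_singleton cs c ih =>
    rw [List.foldl_append, List.foldl_cons, List.foldl_nil]
    obtain ⟨hnd, hlen, hhead, hlast, hwlast, j₀, hlinks⟩ := ih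
    set st := cs.foldl pvStepA ([(0, 0)], [], 0, 0) with hst
    obtain ⟨p, s, x, y⟩ := st
    simp only at hnd hlen hhead hlast hwlast hlinks
    have hpne : p ≠ [] := by intro h; rw [h] at hhead; simp at hhead
    set v := pvMoveA x y c with hv
    have hwalk' : pvWalkB (cs ++ [c]) = pvWalkB cs ++ [v] := by
      rw [walkB_snoc]
      have hgl : (pvWalkB cs).getLastD (0, 0) = (x, y) := by
        rw [List.getLastD_eq_getLast?, hwlast]; rfl
      rw [hgl, hv, move_eq]
    have hld' : pvLastB (pvWalkB (cs ++ [c])) =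
        (pvLastB (pvWalkB cs)).insert v ((pvWalkB cs).length : Int) := by
      rw [hwalk', lastB_snoc]
    have hcsn : cs.length = cs.length := rfl
    have hwn : (pvWalkB cs).length = cs.length + 1 := walkB_length cs
    have hnlen : (cs ++ [c]).length = cs.length + 1 := by simp
    show pvInv (cs ++ [c]) (pvStepA (p, s, x, y) c)
    unfold pvStepA
    simp only [← hv]
    by_cases hmem : v ∈ p
    · rw [if_neg (by simpa using hmem)]
      obtain ⟨k, hk⟩ := List.mem_iff_getElem?.mp hmem
      have hklt : k < p.length := by
        obtain ⟨h', -⟩ := List.getElem?_eq_some_iff.mp hk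
        exact h'
      rw [popA_spec v p s k hnd hk hlen]
      obtain ⟨j₂, hl₂⟩ := links_truncate cs (pvWalkB cs) (pvLastB (pvWalkB cs)) cs.length c v
        hcsn hwn p s j₀ k hlinks hnd hk
      refine ⟨?_, ?_, ?_, ?_, ?_, ?_⟩
      · exact (List.take_sublist _ _).nodup hnd
      · simp only []
        rw [List.length_take, List.length_take]
        omega
      · simp only []
        cases p with
        | nil => exact absurd rfl hpne
        | cons a l =>
          rw [List.take_succ_cons]
          simpa using hhead
      · simp only []
        have h1 : (p.take (k + 1)).getLast? = (p.take (k + 1))[k]? := by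
          rw [List.getLast?_eq_getElem?, List.length_take]
          congr 1
          omega
        rw [h1, List.getElem?_take_of_lt (by omega), hk]
      · rw [hwalk', List.getLast?_concat]
      · refine ⟨j₂, ?_⟩
        rw [hld', hwalk', hnlen]
        simpa using hl₂
    · rw [if_pos (by simpa using hmem)]
      refine ⟨?_, ?_, ?_, ?_, ?_, ?_⟩
      · simp only []
        rw [List.nodup_append]
        exact ⟨hnd, List.nodup_singleton v, by
          intro a ha b hb
          simp at hb
          subst hb
          intro he
          exact hmem (he ▸ ha)⟩
      · simp only []
        rw [List.length_append, List.length_append]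
        simp
        omega
      · simp only []
        cases p with
        | nil => exact absurd rfl hpne
        | cons a l => simpa using hhead
      · simp only []
        rw [List.getLast?_concat]
      · rw [hwalk', List.getLast?_concat]
      · refine ⟨j₀, ?_⟩
        have := links_append cs (pvWalkB cs) (pvLastB (pvWalkB cs)) cs.length c v
          hcsn hwn p s j₀ hlinks hmem
        rw [hld', hwalk', hnlen]
        simpa using this

-- ===== VERDICT (by name: the statement is the Claim_ definition above) =====
theorem simplify_directions_spec : Claim_equal_simplify_directions := by
  intro directions _
  unfold Spec_simplify_directions simplify_directions simplify_directions_alt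
  obtain ⟨hnd, hlen, hhead, hlast, hwlast, j₀, hlinks⟩ := invA directions.toList
  obtain ⟨q, ps, hpe, hq⟩ := links_get _ _ _ _ _ _ _ hlinks
  have hq0 : q = (0, 0) := by rw [hpe] at hhead; simpa using hhead
  subst hq0
  have hgetD : (pvLastB (pvWalkB directions.toList)).getD (0, 0) 0 = (j₀ : Int) := by
    rw [PySem.Dict.getD_eq_get?_getD, hq]; rfl
  have hwl := walkB_length directions.toList
  have hjump := jump_links directions.toList (pvWalkB directions.toList)
      (pvLastB (pvWalkB directions.toList)) directions.toList.length
      (lastB_ge (pvWalkB directions.toList))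
      (directions.toList.foldl pvStepA ([(0, 0)], [], 0, 0)).1
      (directions.toList.foldl pvStepA ([(0, 0)], [], 0, 0)).2.1 j₀
      (pvWalkB directions.toList).length [] hlinks (by omega)
  show String.mk _ = String.mk (pvJumpB directions.toList (pvWalkB directions.toList)
      (pvLastB (pvWalkB directions.toList))
      (((pvWalkB directions.toList).length : Int) - 1)
      (pvWalkB directions.toList).length
      ((pvLastB (pvWalkB directions.toList)).getD (0, 0) 0) [])
  rw [hgetD, show (((pvWalkB directions.toList).length : Int) - 1)
      = (directions.toList.length : Int) by rw [hwl]; push_cast; ring, hjump]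
  simp
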